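-- pv_equiv track=rewrite | github.com/DamianCzajkowski/LearningPrograms | python/dynamic algorithms/number_factor_memoization.py | number_factor
-- ===== SOURCE A (Python) =====
-- def number_factor(n, memo):
--     if n in (0, 1, 2):
--         return 1
--     elif n == 3:
--         return 2
--     elif n not in memo:
--         sub_p1 = number_factor(n-1, memo)
--         sub_p2 = number_factor(n-3, memo)
--         sub_p3 = number_factor(n-4, memo)
--         memo[n] = sub_p1 + sub_p2 + sub_p3
--     return memo[n]
-- ===== SOURCE B (Python) =====
-- def number_factor(n, memo):
--     # Iterative rolling-window DP (no recursion, no memo writes); honours seeded memo entries.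
--     if n in (0, 1, 2):
--         return 1
--     if n == 3:
--         return 2
--     if n in memo:
--         return memo[n]
--     a, b, c, d = 1, 1, 1, 2
--     for k in range(4, n + 1):
--         v = memo.get(k, None)
--         if v is None:
--             v = d + b + a
--         a, b, c, d = b, c, d, v
--     return d
-- ===== Notes on version B (the rewrite author's own statement) =====
-- stated objective: alternative
-- what changed: Replaces A's top-down memoized recursion (which fills the dict and recurses to depth n) with an iterative bottom-up loop keeping only the last four values in a rolling window, consulting the seeded memo read-only; no recursion and no dict writes.
-- outside the precondition, e.g. on number_factor(1000, {999: 1, 997: 1, 996: 1}): A returns 3, B returns 3; on number_factor(-5, {}): A raises RecursionError, B returns 2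
import Mathlib
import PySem

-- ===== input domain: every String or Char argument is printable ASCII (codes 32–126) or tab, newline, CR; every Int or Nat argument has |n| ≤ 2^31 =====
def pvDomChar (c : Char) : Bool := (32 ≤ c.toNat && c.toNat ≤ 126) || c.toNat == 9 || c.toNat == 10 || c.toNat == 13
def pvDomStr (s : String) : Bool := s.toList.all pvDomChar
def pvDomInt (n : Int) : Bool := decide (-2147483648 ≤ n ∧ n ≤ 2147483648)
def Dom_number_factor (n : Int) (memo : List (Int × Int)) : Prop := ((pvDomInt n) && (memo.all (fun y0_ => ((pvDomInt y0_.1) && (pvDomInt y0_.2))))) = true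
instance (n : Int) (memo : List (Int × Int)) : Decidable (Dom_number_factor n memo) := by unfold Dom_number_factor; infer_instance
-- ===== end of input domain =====

-- B replaces A's top-down memoized recursion by an iterative bottom-up rolling window of the
-- last four values, reading the seeded memo but never writing it (A mutates memo in place; the
-- equivalence proved here is about the RETURN value only).

-- ===== PORT A =====
-- fuel-based transliteration of A's recursion (fuel only makes it total; one unit per call frame)
def numberFactorGo : Nat → Int → PySem.Dict Int Int → Int × PySem.Dict Int Int
  | 0, _, memo => (0, memo)        -- fuel exhaustion: unreachable under Pre_
  | Nat.succ fuel, n, memo =>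
    if n = 0 ∨ n = 1 ∨ n = 2 then (1, memo)
    else if n = 3 then (2, memo)
    else
      match memo.get? n with
      | some v => (v, memo)
      | none =>
        let r1 := numberFactorGo fuel (n - 1) memo
        let r2 := numberFactorGo fuel (n - 3) r1.2
        let r3 := numberFactorGo fuel (n - 4) r2.2
        let m4 := r3.2.insert n (r1.1 + r2.1 + r3.1)
        (m4.getD n 0, m4)

def number_factor (n : Int) (memo : List (Int × Int)) : Int :=
  (numberFactorGo (n.toNat + 1) n (PySem.Dict.mk memo)).1

-- ===== PORT B =====
def number_factor_alt (n : Int) (memo : List (Int × Int)) : Int :=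
  let d := PySem.Dict.mk memo
  if n = 0 ∨ n = 1 ∨ n = 2 then 1
  else if n = 3 then 2
  else
    match d.get? n with
    | some v => v
    | none =>
      let st := (PySem.List.pyRange 4 (n + 1) 1).foldl
        (fun (s : Int × Int × Int × Int) k =>
          let v := match d.get? k with
            | some v => v
            | none => s.2.2.2 + s.2.1 + s.1
          (s.2.1, s.2.2.1, s.2.2.2, v)) (1, 1, 1, 2)
      st.2.2.2

-- ===== PRECONDITION & SPEC =====
-- A recurses one frame per step down towards the base cases, so it raises RecursionError where
-- that descent exhausts the interpreter's recursion limit: for negative n not in memo (unbounded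
-- descent), and for unmemoized n beyond roughly the limit (1000 in standard CPython, so A raises
-- from n ≈ 1005 there; environments that raise the limit move the boundary). The crash boundary
-- is environment-dependent, so Pre_ stops just below the standard one at n ≤ 980; n already in
-- memo is returned at once at any size and is admitted unconditionally.
def Pre_number_factor (n : Int) (memo : List (Int × Int)) : Prop :=
  (0 ≤ n ∧ n ≤ 980) ∨ ((PySem.Dict.mk memo).get? n).isSome
instance (n : Int) (memo : List (Int × Int)) : Decidable (Pre_number_factor n memo) := by
  unfold Pre_number_factor; infer_instance

def pvWitness_number_factor : Int × (List (Int × Int)) := (10, [(7, 5)])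

def Spec_number_factor (n : Int) (memo : List (Int × Int)) (out : Int) : Prop := out = number_factor_alt n memo
instance (n : Int) (memo : List (Int × Int)) (out : Int) : Decidable (Spec_number_factor n memo out) := by unfold Spec_number_factor; infer_instance

-- ===== CLAIM (what is proved, stated in full; the proofs are below) =====
def Claim_equal_number_factor : Prop := ∀ (n : Int) (memo : List (Int × Int)), Dom_number_factor n memo → Pre_number_factor n memo → Spec_number_factor n memo (number_factor n memo)

-- ===== LEMMAS AND PROOFS =====

-- the common specification: value of the recurrence with the ORIGINAL memo's seeds honoured
def gAux (d : PySem.Dict Int Int) : Nat → Int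
  | 0 => 1
  | 1 => 1
  | 2 => 1
  | 3 => 2
  | (k + 4) =>
    match d.get? ((k : Int) + 4) with
    | some v => v
    | none => gAux d (k + 3) + gAux d (k + 1) + gAux d k

-- memo states A threads: extend the original dict, and every entry at key ≥ 4 carries the g-value
def GoodMemo (d0 m : PySem.Dict Int Int) : Prop :=
  (∀ k v, d0.get? k = some v → m.get? k = some v) ∧
  (∀ k v, 4 ≤ k → m.get? k = some v → v = gAux d0 k.toNat)

theorem goodMemo_refl (d0 : PySem.Dict Int Int) : GoodMemo d0 d0 := by
  refine ⟨fun k v h => h, fun k v hk h => ?_⟩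
  obtain ⟨j, rfl⟩ : ∃ j : Nat, k = (j : Int) + 4 := ⟨(k - 4).toNat, by omega⟩
  have hj : ((j : Int) + 4).toNat = j + 4 := by omega
  rw [hj]
  simp only [gAux, h]

theorem gAux_base (d0 : PySem.Dict Int Int) (n : Int) (h : n = 0 ∨ n = 1 ∨ n = 2) :
    gAux d0 n.toNat = 1 := by
  rcases h with h | h | h <;> subst h <;> rfl

theorem goA (d0 : PySem.Dict Int Int) :
    ∀ (fuel : Nat) (n : Int) (m : PySem.Dict Int Int), n.toNat < fuel → 0 ≤ n → GoodMemo d0 m →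
      (numberFactorGo fuel n m).1 = gAux d0 n.toNat ∧ GoodMemo d0 (numberFactorGo fuel n m).2 := by
  intro fuel
  induction fuel with
  | zero => intro n m hf; omega
  | succ fuel ih =>
    intro n m hf hn hgm
    by_cases hb : n = 0 ∨ n = 1 ∨ n = 2
    · simp only [numberFactorGo, if_pos hb]
      exact ⟨(gAux_base d0 n hb).symm, hgm⟩
    · by_cases h3 : n = 3
      · subst h3
        simp only [numberFactorGo, if_neg hb]
        exact ⟨rfl, hgm⟩
      · have h4 : 4 ≤ n := by omega
        obtain ⟨j, rfl⟩ : ∃ j : Nat, n = (j : Int) + 4 := ⟨(n - 4).toNat, by omega⟩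
        have hj : ((j : Int) + 4).toNat = j + 4 := by omega
        simp only [numberFactorGo, if_neg hb, if_neg h3]
        cases hget : m.get? ((j : Int) + 4) with
        | some v =>
          simp only
          exact ⟨hgm.2 _ v h4 hget, hgm⟩
        | none =>
          have h1 := ih ((j : Int) + 4 - 1) m (by omega) (by omega) hgm
          have h2 := ih ((j : Int) + 4 - 3) (numberFactorGo fuel ((j : Int) + 4 - 1) m).2
            (by omega) (by omega) h1.2
          have h3' := ih ((j : Int) + 4 - 4)
            (numberFactorGo fuel ((j : Int) + 4 - 3) (numberFactorGo fuel ((j : Int) + 4 - 1) m).2).2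
            (by omega) (by omega) h2.2
          have e1 : ((j : Int) + 4 - 1).toNat = j + 3 := by omega
          have e2 : ((j : Int) + 4 - 3).toNat = j + 1 := by omega
          have e3 : ((j : Int) + 4 - 4).toNat = j := by omega
          rw [e1] at h1; rw [e2] at h2; rw [e3] at h3'
          have hd0 : d0.get? ((j : Int) + 4) = none := by
            cases hd : d0.get? ((j : Int) + 4) with
            | none => rfl
            | some w => rw [hgm.1 _ w hd] at hget; exact absurd hget (by simp)
          have hgval : gAux d0 (j + 4) = gAux d0 (j + 3) + gAux d0 (j + 1) + gAux d0 j := by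
            simp only [gAux, hd0]
          set s := (numberFactorGo fuel ((j : Int) + 4 - 1) m).1 +
            (numberFactorGo fuel ((j : Int) + 4 - 3) (numberFactorGo fuel ((j : Int) + 4 - 1) m).2).1 +
            (numberFactorGo fuel ((j : Int) + 4 - 4)
              (numberFactorGo fuel ((j : Int) + 4 - 3) (numberFactorGo fuel ((j : Int) + 4 - 1) m).2).2).1 with hs
          have hsv : s = gAux d0 (j + 4) := by rw [hs, h1.1, h2.1, h3'.1, hgval]
          simp only
          constructor
          · rw [PySem.Dict.getD_insert_self, hj, hsv]
          · constructor
            · intro k v hk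
              by_cases hkn : k = (j : Int) + 4
              · subst hkn; rw [hk] at hd0; exact absurd hd0 (by simp)
              · rw [PySem.Dict.get?_insert_of_ne _ _ hkn]
                exact h3'.2.1 _ v hk
            · intro k v hk4 hkv
              by_cases hkn : k = (j : Int) + 4
              · subst hkn
                rw [PySem.Dict.get?_insert_self] at hkv
                injection hkv with hv
                rw [← hv, hsv, hj]
              · rw [PySem.Dict.get?_insert_of_ne _ _ hkn] at hkv
                exact h3'.2.2 _ v hk4 hkv

-- B's fold over range(4, k+4) ends in the window (g k, g (k+1), g (k+2), g (k+3))
theorem foldB (d : PySem.Dict Int Int) (k : Nat) :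
    (PySem.List.pyRange 4 ((k : Int) + 4) 1).foldl
      (fun (s : Int × Int × Int × Int) k =>
        let v := match d.get? k with
          | some v => v
          | none => s.2.2.2 + s.2.1 + s.1
        (s.2.1, s.2.2.1, s.2.2.2, v)) (1, 1, 1, 2)
    = (gAux d k, gAux d (k + 1), gAux d (k + 2), gAux d (k + 3)) := by
  induction k with
  | zero =>
    rw [show ((0 : Nat) : Int) + 4 = 4 by norm_num, PySem.List.pyRange_one_eq_nil (by norm_num)]
    rfl
  | succ k ih =>
    have hsplit : PySem.List.pyRange 4 (((k + 1 : Nat) : Int) + 4) 1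
        = PySem.List.pyRange 4 ((k : Int) + 4) 1 ++ [(k : Int) + 4] := by
      rw [show (((k + 1 : Nat) : Int) + 4) = ((k : Int) + 4) + 1 by push_cast; ring]
      exact PySem.List.pyRange_one_succ_right (by omega)
    rw [hsplit, List.foldl_append, ih]
    simp only [List.foldl]
    have : gAux d (k + 4) = match d.get? ((k : Int) + 4) with
        | some v => v
        | none => gAux d (k + 3) + gAux d (k + 1) + gAux d k := rfl
    cases hget : d.get? ((k : Int) + 4) with
    | some v =>
      simp only [hget] at this
      simp only [this]
    | none =>
      simp only [hget] at this
      simp only [this]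

theorem altB (d0 : PySem.Dict Int Int) (n : Int) (memo : List (Int × Int))
    (hd : PySem.Dict.mk memo = d0)
    (h4 : 4 ≤ n) (hnone : d0.get? n = none) :
    number_factor_alt n memo = gAux d0 n.toNat := by
  obtain ⟨j, rfl⟩ : ∃ j : Nat, n = (j : Int) + 4 := ⟨(n - 4).toNat, by omega⟩
  have hj : ((j : Int) + 4).toNat = j + 4 := by omega
  unfold number_factor_alt
  rw [hd]
  rw [if_neg (by omega), if_neg (by omega), hnone]
  have hr : (j : Int) + 4 + 1 = ((j + 1 : Nat) : Int) + 4 := by push_cast; ring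
  simp only [hr, foldB d0 (j + 1), hj]

-- ===== VERDICT (by name: the statement is the Claim_ definition above) =====
theorem number_factor_spec : Claim_equal_number_factor := by
  intro n memo _hdom hpre
  unfold Spec_number_factor number_factor
  set d0 := PySem.Dict.mk memo with hd
  by_cases hb : n = 0 ∨ n = 1 ∨ n = 2
  · have hA : (numberFactorGo (n.toNat + 1) n d0).1 = 1 := by
      simp only [numberFactorGo, if_pos hb]
    have hB : number_factor_alt n memo = 1 := by
      unfold number_factor_alt; rw [if_pos hb]
    rw [hA, hB]
  · by_cases h3 : n = 3
    · subst h3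
      have hA : (numberFactorGo ((3 : Int).toNat + 1) 3 d0).1 = 2 := by
        simp [numberFactorGo]
      have hB : number_factor_alt 3 memo = 2 := by
        unfold number_factor_alt; rw [if_neg hb, if_pos rfl]
      rw [hA, hB]
    · cases hget : d0.get? n with
      | some v =>
        have hA : (numberFactorGo (n.toNat + 1) n d0).1 = v := by
          simp only [numberFactorGo, if_neg hb, if_neg h3, hget]
        have hB : number_factor_alt n memo = v := by
          unfold number_factor_alt
          rw [← hd, if_neg hb, if_neg h3, hget]
        rw [hA, hB]
      | none =>
        have hn : 0 ≤ n := by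
          rcases hpre with ⟨h, _⟩ | h
          · exact h
          · rw [← hd, hget] at h; exact absurd h (by simp)
        have h4 : 4 ≤ n := by omega
        have hA := goA d0 (n.toNat + 1) n d0 (by omega) hn (goodMemo_refl d0)
        rw [hA.1, altB d0 n memo hd.symm h4 hget]
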